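-- pv_equiv track=rewrite | github.com/edallal/AdventOfCode | 2021-12-20/Code_202112120b.py | Convert2Index
-- ===== SOURCE A (Python) =====
-- def Convert2Index(mat):
--     val = 0
--     for i in range(3):
--         for c in mat[i]:
--             val *= 2
--             if c == '#':
--                 val += 1
--     return val
-- ===== SOURCE B (Python) =====
-- def Convert2Index(mat):
--     # Collect the bits, then sum positional weights scanning BACK-TO-FRONT:
--     # the last character has weight 1, and the weight doubles as we move left.
--     bits = [c == '#' for i in range(3) for c in mat[i]]
--     total = 0
--     weight = 1
--     for b in reversed(bits):
--         if b:
--             total += weight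
--         weight *= 2
--     return total
-- ===== Notes on version B (the rewrite author's own statement) =====
-- stated objective: alternative
-- what changed: Replaces A's front-to-back Horner doubling accumulator with a reverse traversal that keeps an explicit power-of-two weight and sums the weights of the '#' positions (sum-of-positional-weights instead of repeated doubling of the partial value).
import Mathlib
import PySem

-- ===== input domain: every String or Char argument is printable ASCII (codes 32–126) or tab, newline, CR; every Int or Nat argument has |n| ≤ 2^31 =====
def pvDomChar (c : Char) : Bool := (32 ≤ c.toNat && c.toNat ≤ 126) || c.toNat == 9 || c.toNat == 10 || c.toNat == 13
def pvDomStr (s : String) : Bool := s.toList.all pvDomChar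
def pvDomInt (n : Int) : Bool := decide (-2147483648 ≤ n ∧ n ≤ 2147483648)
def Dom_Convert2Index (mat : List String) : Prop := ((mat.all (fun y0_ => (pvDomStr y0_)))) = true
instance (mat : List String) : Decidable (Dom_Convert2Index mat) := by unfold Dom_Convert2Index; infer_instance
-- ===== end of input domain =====

-- B replaces A's front-to-back doubling accumulator by a reverse traversal with an
-- explicit power-of-two weight, summing the weights of the '#' positions; same cost.

-- ===== PORT A =====
-- for i in range(3): for c in mat[i]: val *= 2; if c == '#': val += 1
-- (mat[i] with i out of range raises IndexError; Pre_ excludes that, so getD "" is exact inside Pre_)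
def Convert2Index (mat : List String) : Int :=
  (PySem.List.pyRange 0 3 1).foldl
    (fun val i =>
      ((PySem.List.pyGet? mat i).getD "").toList.foldl
        (fun v c => if c = '#' then v * 2 + 1 else v * 2) val)
    0

-- ===== PORT B =====
-- bits = [c=='#' ...]; then reversed scan with (total, weight), weight doubling each step
def Convert2Index_alt (mat : List String) : Int :=
  let bits : List Bool :=
    (PySem.List.pyRange 0 3 1).flatMap
      (fun i => ((PySem.List.pyGet? mat i).getD "").toList.map (fun c => c = '#'))
  (bits.reverse.foldl
    (fun (s : Int × Int) b => (if b then s.1 + s.2 else s.1, s.2 * 2)) (0, 1)).1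

-- ===== PRECONDITION & SPEC =====
-- A indexes mat[0], mat[1], mat[2]: lists shorter than 3 make A raise IndexError.
def Pre_Convert2Index (mat : List String) : Prop := 3 ≤ mat.length
instance (mat : List String) : Decidable (Pre_Convert2Index mat) := by unfold Pre_Convert2Index; infer_instance
def pvWitness_Convert2Index : List String := ["#.#", "...", "##"]
def Spec_Convert2Index (mat : List String) (out : Int) : Prop := out = Convert2Index_alt mat
instance (mat : List String) (out : Int) : Decidable (Spec_Convert2Index mat out) := by unfold Spec_Convert2Index; infer_instance

-- ===== CLAIM =====
def Claim_equal_Convert2Index : Prop := ∀ (mat : List String), Dom_Convert2Index mat → Pre_Convert2Index mat → Spec_Convert2Index mat (Convert2Index mat)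

-- ===== LEMMAS AND PROOFS =====

-- positional value of a bit list (MSB first)
def pvV : List Bool → Int
  | [] => 0
  | x :: t => (if x then (2 : Int) ^ t.length else 0) + pvV t

theorem pv_rev (l : List Bool) (T P : Int) :
    l.reverse.foldl (fun (s : Int × Int) b => (if b then s.1 + s.2 else s.1, s.2 * 2)) (T, P)
      = (T + pvV l * P, P * 2 ^ l.length) := by
  induction l generalizing T P with
  | nil => simp [pvV]
  | cons x t ih =>
    simp only [List.reverse_cons, List.foldl_append, ih, List.foldl_cons, List.foldl_nil,
      pvV, List.length_cons]
    by_cases hx : x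
    · simp [hx, Prod.ext_iff]
      exact ⟨by ring, by ring⟩
    · simp [hx, Prod.ext_iff]
      ring

theorem pv_afold (l : List Char) (v : Int) :
    l.foldl (fun v c => if c = '#' then v * 2 + 1 else v * 2) v
      = v * 2 ^ l.length + pvV (l.map (fun c => c = '#')) := by
  induction l generalizing v with
  | nil => simp [pvV]
  | cons c t ih =>
    simp only [List.foldl_cons, ih, List.map_cons, pvV, List.length_cons]
    by_cases hc : c = '#' <;> simp [hc] <;> ring

theorem pv_append (a b : List Bool) :
    pvV (a ++ b) = pvV a * 2 ^ b.length + pvV b := by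
  induction a with
  | nil => simp [pvV]
  | cons x t ih =>
    simp only [List.cons_append, pvV, ih, List.length_append]
    by_cases hx : x <;> simp [hx, pow_add] <;> ring

-- ===== VERDICT =====
theorem Convert2Index_spec : Claim_equal_Convert2Index := by
  intro mat _ _
  unfold Spec_Convert2Index Convert2Index Convert2Index_alt
  have hr : PySem.List.pyRange 0 3 1 = [0, 1, 2] := by decide
  rw [hr]
  simp only [List.foldl_cons, List.foldl_nil, List.flatMap_cons, List.flatMap_nil,
    List.append_nil]
  rw [pv_rev]
  simp only [pv_afold, pv_append, List.length_append, List.length_map]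
  ring
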